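-- pv_equiv track=rewrite | github.com/ChrisNeedham24/microcosm | source/util/calculator.py | gen_spiral_indices
-- ===== SOURCE A (Python) =====
-- from typing import List, Tuple, Set, Generator, Optional
--
-- def gen_spiral_indices(initial_loc: (int, int)) -> List[Tuple[int, int]]:
--     """
--     Generate indices (or locations) around a supplied point in a spiral fashion. The below diagram indicates the order
--     in which points should be returned.
--
--     ----------------
--     |20|21|22|23|24|
--     ----------------
--     |19|06|07|08|09|
--     ----------------
--     |18|05|XX|01|10|
--     ----------------
--     |17|04|03|02|11|
--     ----------------
--     |16|15|14|13|12|
--     ----------------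
--
--     :param initial_loc: The point to 'spiral' around.
--     :return: A list of locations, in the order of the spiral.
--     """
--     indices: List[Tuple[int, int]] = []
--
--     x = 0
--     y = 0
--     delta = 1
--     m = 1
--
--     while m <= 5:
--         while 2 * x * delta < m:
--             indices.append((x + initial_loc[0], y + initial_loc[1]))
--             x += delta
--         while 2 * y * delta < m:
--             indices.append((x + initial_loc[0], y + initial_loc[1]))
--             y += delta
--         delta *= -1
--         m += 1
--
--     return indices
-- ===== SOURCE B (Python) =====
-- def gen_spiral_indices(initial_loc):
--     # Classic direction-walk spiral: cycle through four unit steps with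
--     # run lengths 1,1,2,2,3,3,4,4,5 and a final truncated run of 4.
--     dirs = [(1, 0), (0, 1), (-1, 0), (0, -1)]
--     runs = [1, 1, 2, 2, 3, 3, 4, 4, 5, 4]
--     x0, y0 = initial_loc
--     out = [(x0, y0)]
--     dx = dy = 0
--     for i, run in enumerate(runs):
--         sx, sy = dirs[i % 4]
--         for _ in range(run):
--             dx += sx
--             dy += sy
--             out.append((dx + x0, dy + y0))
--     return out
-- ===== Notes on version B (the rewrite author's own statement) =====
-- stated objective: idiomatic
-- what changed: Replaced A's sign-flipping '2*x*delta < m' while-loop arithmetic with the classic spiral walk: a direction cursor cycling through the four unit steps with run lengths 1,1,2,2,3,3,4,4,5,4, emitting the shifted point at each step.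
import Mathlib
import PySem

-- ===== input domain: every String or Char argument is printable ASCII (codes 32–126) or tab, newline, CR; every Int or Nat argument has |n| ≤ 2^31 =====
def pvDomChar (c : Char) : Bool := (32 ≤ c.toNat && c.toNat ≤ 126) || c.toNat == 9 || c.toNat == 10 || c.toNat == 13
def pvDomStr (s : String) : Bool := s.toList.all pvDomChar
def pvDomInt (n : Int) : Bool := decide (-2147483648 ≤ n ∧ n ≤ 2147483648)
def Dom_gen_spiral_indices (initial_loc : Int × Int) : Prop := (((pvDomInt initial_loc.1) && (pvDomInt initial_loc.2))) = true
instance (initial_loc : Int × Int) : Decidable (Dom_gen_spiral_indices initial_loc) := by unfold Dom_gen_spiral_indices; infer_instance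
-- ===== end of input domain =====

-- B replaces A's sign-flipping while-loop arithmetic by the classic spiral walk:
-- a direction cursor cycling through the four unit steps with run lengths
-- 1,1,2,2,3,3,4,4,5,4 (objective: idiomatic decomposition; same cost).

-- ===== PORT A =====
-- inner 'while 2 * x * delta < m' loop of A (fuel only makes the loop total; 20 is ample)
def pvA_loopX (fuel : Nat) (x y delta m : Int) (p : Int × Int) (acc : List (Int × Int)) :
    Int × List (Int × Int) :=
  match fuel with
  | 0 => (x, acc)
  | f + 1 =>
    if 2 * x * delta < m then
      pvA_loopX f (x + delta) y delta m p (acc ++ [(x + p.1, y + p.2)])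
    else (x, acc)

-- inner 'while 2 * y * delta < m' loop of A
def pvA_loopY (fuel : Nat) (x y delta m : Int) (p : Int × Int) (acc : List (Int × Int)) :
    Int × List (Int × Int) :=
  match fuel with
  | 0 => (y, acc)
  | f + 1 =>
    if 2 * y * delta < m then
      pvA_loopY f x (y + delta) delta m p (acc ++ [(x + p.1, y + p.2)])
    else (y, acc)

-- outer 'while m <= 5' loop of A
def pvA_outer (fuel : Nat) (x y delta m : Int) (p : Int × Int) (acc : List (Int × Int)) :
    List (Int × Int) :=
  match fuel with
  | 0 => acc
  | f + 1 =>
    if m ≤ 5 then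
      let r1 := pvA_loopX 20 x y delta m p acc
      let r2 := pvA_loopY 20 r1.1 y delta m p r1.2
      pvA_outer f r1.1 r2.1 (delta * -1) (m + 1) p r2.2
    else acc

def gen_spiral_indices (initial_loc : Int × Int) : List (Int × Int) :=
  pvA_outer 10 0 0 1 1 initial_loc []

-- ===== PORT B =====
def pvB_dirs : List (Int × Int) := [(1, 0), (0, 1), (-1, 0), (0, -1)]
def pvB_runs : List Nat := [1, 1, 2, 2, 3, 3, 4, 4, 5, 4]

-- one step of the walk: advance (dx,dy) by direction d and append the shifted point
def pvB_step (p d : Int × Int) (st : Int × Int × List (Int × Int)) :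
    Int × Int × List (Int × Int) :=
  (st.1 + d.1, st.2.1 + d.2, st.2.2 ++ [(st.1 + d.1 + p.1, st.2.1 + d.2 + p.2)])

def gen_spiral_indices_alt (initial_loc : Int × Int) : List (Int × Int) :=
  (pvB_runs.zipIdx.foldl (fun st ri =>
      (List.range ri.1).foldl (fun st _ =>
        pvB_step initial_loc (pvB_dirs.getD (ri.2 % 4) (0, 0)) st) st)
    (0, 0, [(initial_loc.1, initial_loc.2)])).2.2

-- ===== PRECONDITION & SPEC =====
def Spec_gen_spiral_indices (initial_loc : Int × Int) (out : List (Int × Int)) : Prop := out = gen_spiral_indices_alt initial_loc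
instance (initial_loc : Int × Int) (out : List (Int × Int)) : Decidable (Spec_gen_spiral_indices initial_loc out) := by unfold Spec_gen_spiral_indices; infer_instance

-- ===== CLAIM (what is proved, stated in full; the proofs are below) =====
def Claim_equal_gen_spiral_indices : Prop := ∀ (initial_loc : Int × Int), Dom_gen_spiral_indices initial_loc → Spec_gen_spiral_indices initial_loc (gen_spiral_indices initial_loc)

-- ===== LEMMAS AND PROOFS =====

-- translate a point by (a,b)
def pvShift (a b : Int) (o : Int × Int) : Int × Int := (o.1 + a, o.2 + b)

theorem pvA_loopX_shift (a b : Int) : ∀ (fuel : Nat) (x y d m : Int) (acc : List (Int × Int)),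
    pvA_loopX fuel x y d m (a, b) (acc.map (pvShift a b))
      = ((pvA_loopX fuel x y d m (0, 0) acc).1,
         (pvA_loopX fuel x y d m (0, 0) acc).2.map (pvShift a b)) := by
  intro fuel
  induction fuel with
  | zero => intro x y d m acc; simp [pvA_loopX]
  | succ f ih =>
    intro x y d m acc
    simp only [pvA_loopX]
    split_ifs with h
    · have e : acc.map (pvShift a b) ++ [(x + a, y + b)]
          = (acc ++ [(x + (0:Int), y + (0:Int))]).map (pvShift a b) := by
        simp [pvShift]
      simp only [e]
      exact ih (x + d) y d m (acc ++ [(x + 0, y + 0)])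
    · simp

theorem pvA_loopY_shift (a b : Int) : ∀ (fuel : Nat) (x y d m : Int) (acc : List (Int × Int)),
    pvA_loopY fuel x y d m (a, b) (acc.map (pvShift a b))
      = ((pvA_loopY fuel x y d m (0, 0) acc).1,
         (pvA_loopY fuel x y d m (0, 0) acc).2.map (pvShift a b)) := by
  intro fuel
  induction fuel with
  | zero => intro x y d m acc; simp [pvA_loopY]
  | succ f ih =>
    intro x y d m acc
    simp only [pvA_loopY]
    split_ifs with h
    · have e : acc.map (pvShift a b) ++ [(x + a, y + b)]
          = (acc ++ [(x + (0:Int), y + (0:Int))]).map (pvShift a b) := by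
        simp [pvShift]
      simp only [e]
      exact ih x (y + d) d m (acc ++ [(x + 0, y + 0)])
    · simp

theorem pvA_outer_shift (a b : Int) : ∀ (fuel : Nat) (x y d m : Int) (acc : List (Int × Int)),
    pvA_outer fuel x y d m (a, b) (acc.map (pvShift a b))
      = (pvA_outer fuel x y d m (0, 0) acc).map (pvShift a b) := by
  intro fuel
  induction fuel with
  | zero => intro x y d m acc; simp [pvA_outer]
  | succ f ih =>
    intro x y d m acc
    simp only [pvA_outer]
    split_ifs with h
    · rw [pvA_loopX_shift, pvA_loopY_shift, ih]
    · rfl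

theorem pvB_fold_shift (a b : Int) : ∀ (rs : List (Nat × Nat)) (dx dy : Int) (acc : List (Int × Int)),
    rs.foldl (fun st ri =>
        (List.range ri.1).foldl (fun st _ =>
          pvB_step (a, b) (pvB_dirs.getD (ri.2 % 4) (0, 0)) st) st) (dx, dy, acc.map (pvShift a b))
      = (let r := rs.foldl (fun st ri =>
            (List.range ri.1).foldl (fun st _ =>
              pvB_step (0, 0) (pvB_dirs.getD (ri.2 % 4) (0, 0)) st) st) (dx, dy, acc);
         (r.1, r.2.1, r.2.2.map (pvShift a b))) := by
  have inner : ∀ (l : List Nat) (d : Int × Int) (dx dy : Int) (acc : List (Int × Int)),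
      l.foldl (fun st _ => pvB_step (a, b) d st) (dx, dy, acc.map (pvShift a b))
        = (let r := l.foldl (fun st _ => pvB_step (0, 0) d st) (dx, dy, acc);
           (r.1, r.2.1, r.2.2.map (pvShift a b))) := by
    intro l
    induction l with
    | nil => intro d dx dy acc; simp
    | cons hd tl ih =>
      intro d dx dy acc
      simp only [List.foldl_cons]
      have e : pvB_step (a, b) d (dx, dy, acc.map (pvShift a b))
          = (dx + d.1, dy + d.2, (acc ++ [(dx + d.1 + 0, dy + d.2 + 0)]).map (pvShift a b)) := by
        simp [pvB_step, pvShift]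
      rw [e]
      have := ih d (dx + d.1) (dy + d.2) (acc ++ [(dx + d.1 + 0, dy + d.2 + 0)])
      simp only [this]
      simp [pvB_step]
  intro rs
  induction rs with
  | nil => intro dx dy acc; simp
  | cons hd tl ih =>
    intro dx dy acc
    simp only [List.foldl_cons]
    rw [inner]
    simp only
    exact ih _ _ _

theorem gen_spiral_indices_shift (a b : Int) :
    gen_spiral_indices (a, b) = (gen_spiral_indices (0, 0)).map (pvShift a b) := by
  have h0 : ([] : List (Int × Int)) = ([] : List (Int × Int)).map (pvShift a b) := by simp
  unfold gen_spiral_indices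
  rw [h0, pvA_outer_shift]
  simp

theorem gen_spiral_indices_alt_shift (a b : Int) :
    gen_spiral_indices_alt (a, b) = (gen_spiral_indices_alt (0, 0)).map (pvShift a b) := by
  unfold gen_spiral_indices_alt
  have h0 : [((a, b).1, (a, b).2)] = ([(((0:Int), (0:Int)).1, ((0:Int), (0:Int)).2)]).map (pvShift a b) := by
    simp [pvShift]
  rw [h0, pvB_fold_shift]

theorem pv_base : gen_spiral_indices (0, 0) = gen_spiral_indices_alt (0, 0) := by decide

-- ===== VERDICT (by name: the statement is the Claim_ definition above) =====
theorem gen_spiral_indices_spec : Claim_equal_gen_spiral_indices := by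
  intro p _
  obtain ⟨a, b⟩ := p
  unfold Spec_gen_spiral_indices
  rw [gen_spiral_indices_shift, gen_spiral_indices_alt_shift, pv_base]
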